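-- pv_equiv track=rewrite | github.com/Alireza2317/eli | hw_solutions/hw5/5.12.py | function
-- ===== SOURCE A (Python) =====
-- def function(L, a, b):
-- 	d = {}
--
-- 	for item in L:
-- 		if item in d:
-- 			d[item] += 1
-- 		else:
-- 			d[item] = 1
--
-- 	output = []
-- 	for item, count in d.items():
-- 		if a <= count <= b:
-- 			output.append(item)
--
-- 	return output
-- ===== SOURCE B (Python) =====
-- def function(L, a, b):
--     # Successive extraction: repeatedly take the first remaining item, strip
--     # ALL of its occurrences from the remainder, and read its frequency off
--     # the length drop.  No frequency dictionary and no per-item count() scan.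
--     out = []
--     rest = L
--     while rest:
--         x = rest[0]
--         tail = [y for y in rest[1:] if y != x]
--         c = len(rest) - len(tail)
--         if a <= c <= b:
--             out.append(x)
--         rest = tail
--     return out
-- ===== Notes on version B (the rewrite author's own statement) =====
-- stated objective: alternative
-- what changed: Replaces A's frequency-dictionary build plus second output loop by a successive-extraction loop: repeatedly take the first remaining element, remove all its occurrences by filtering, and obtain its frequency as the length difference, appending it immediately when in [a,b].
import Mathlib
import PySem

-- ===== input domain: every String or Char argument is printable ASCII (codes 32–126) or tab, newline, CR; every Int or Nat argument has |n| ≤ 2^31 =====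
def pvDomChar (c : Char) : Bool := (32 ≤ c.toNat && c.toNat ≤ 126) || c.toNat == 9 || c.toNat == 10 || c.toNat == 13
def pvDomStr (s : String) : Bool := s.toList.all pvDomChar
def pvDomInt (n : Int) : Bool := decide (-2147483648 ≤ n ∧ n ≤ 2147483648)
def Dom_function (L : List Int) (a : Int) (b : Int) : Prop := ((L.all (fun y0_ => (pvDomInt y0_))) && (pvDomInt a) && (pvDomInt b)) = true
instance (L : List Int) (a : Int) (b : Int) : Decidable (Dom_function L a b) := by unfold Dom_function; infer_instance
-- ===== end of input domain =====

-- B replaces A's frequency dictionary and second output loop with a successive-extraction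
-- loop (take first remaining item, filter out all its occurrences, frequency = length drop);
-- objective: alternative.

-- ===== PORT A =====
def function (L : List Int) (a : Int) (b : Int) : List Int :=
  let d : PySem.Dict Int Int :=
    L.foldl (fun d item =>
      if d.contains item then d.insert item (d.getD item 0 + 1)
      else d.insert item 1) PySem.Dict.empty
  d.items.foldl (fun output ic =>
    if a ≤ ic.2 ∧ ic.2 ≤ b then output ++ [ic.1] else output) []

-- ===== PORT B =====
-- Source B's while loop: state = (out, rest); terminates since the filtered tail is shorter.
def functionAltLoop (a b : Int) (out : List Int) : List Int → List Int
  | [] => out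
  | x :: rs =>
    let tail := rs.filter (fun y => y != x)
    let c : Int := ((x :: rs).length : Int) - (tail.length : Int)
    functionAltLoop a b (if a ≤ c ∧ c ≤ b then out ++ [x] else out) tail
termination_by rest => rest.length
decreasing_by
  simpa using Nat.lt_succ_of_le (List.length_filter_le _ _)

def function_alt (L : List Int) (a : Int) (b : Int) : List Int :=
  functionAltLoop a b [] L

-- ===== PRECONDITION & SPEC =====
def Spec_function (L : List Int) (a : Int) (b : Int) (out : List Int) : Prop := out = function_alt L a b
instance (L : List Int) (a : Int) (b : Int) (out : List Int) : Decidable (Spec_function L a b out) := by unfold Spec_function; infer_instance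

-- ===== CLAIM (what is proved, stated in full; the proofs are below) =====
def Claim_equal_function : Prop := ∀ (L : List Int) (a : Int) (b : Int), Dom_function L a b → Spec_function L a b (function L a b)

-- ===== LEMMAS AND PROOFS =====

-- A's branching counting loop builds exactly Counter(L)
theorem function_dict_eq_counter (L : List Int) :
    L.foldl (fun d item =>
      if d.contains item then d.insert item (d.getD item 0 + 1)
      else d.insert item 1) PySem.Dict.empty = PySem.Dict.counter L := by
  rw [PySem.Dict.counter_eq_foldl]
  apply PySem.List.foldl_congr_mem
  intro d x _
  by_cases h : d.contains x = true
  · simp [h, PySem.Dict.modify]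
  · have h0 : d.getD x 0 = 0 := by
      have hn : d.get? x = none := by
        rw [PySem.Dict.get?_eq_none_iff_contains]
        simpa using h
      simp [PySem.Dict.getD, hn]
    simp [h, PySem.Dict.modify, h0]

-- A computes the first-occurrence distinct items whose frequency lies in [a, b]
theorem function_eq_dedup_filter (L : List Int) (a b : Int) :
    function L a b =
      (PySem.List.dedup L).filter
        (fun x => decide (a ≤ (L.count x : Int) ∧ (L.count x : Int) ≤ b)) := by
  unfold function
  simp only [function_dict_eq_counter, PySem.Dict.items_counter]
  rw [PySem.List.foldl_append_ite (p := fun ic : Int × Int => a ≤ ic.2 ∧ ic.2 ≤ b) (f := Prod.fst)]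
  simp [List.filter_map, Function.comp_def, PySem.List.dedup_eq_ofList]

-- folding Set.add over a list ignores elements already in the accumulator
theorem foldl_add_filter_ne (x : Int) (l s : List Int) (hx : x ∈ s) :
    l.foldl PySem.Set.add s = (l.filter (fun y => y != x)).foldl PySem.Set.add s := by
  induction l generalizing s with
  | nil => rfl
  | cons y ys ih =>
    by_cases h : y = x
    · subst h
      simpa [List.filter_cons, PySem.Set.add, hx] using ih s hx
    · have hx' : x ∈ PySem.Set.add s y := by
        simp [PySem.Set.add]
        split <;> simp [hx]
      simp [h, ih _ hx', bne_iff_ne]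

-- a head element absent from the list commutes out of the Set.add fold
theorem foldl_add_cons_head (c : Int) (l s : List Int) (hc : c ∉ l) :
    l.foldl PySem.Set.add (c :: s) = c :: l.foldl PySem.Set.add s := by
  induction l generalizing s with
  | cons y ys ih =>
    have hyc : y ≠ c := fun h => hc (h ▸ List.mem_cons_self)
    have hc' : c ∉ ys := fun h => hc (List.mem_cons_of_mem _ h)
    by_cases h : y ∈ s
    · have e1 : PySem.Set.add (c :: s) y = c :: s := by
        simp [PySem.Set.add, h]
      have e2 : PySem.Set.add s y = s := by simp [PySem.Set.add, h]
      simp only [List.foldl_cons, e1, e2, ih _ hc']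
    · have e1 : PySem.Set.add (c :: s) y = c :: (s ++ [y]) := by
        simp [PySem.Set.add, h, hyc]
      have e2 : PySem.Set.add s y = s ++ [y] := by simp [PySem.Set.add, h]
      simp only [List.foldl_cons, e1, e2, ih _ hc']
  | nil => rfl

-- dedup unfolds one step of successive extraction
theorem dedup_cons_filter (x : Int) (rs : List Int) :
    PySem.List.dedup (x :: rs) = x :: PySem.List.dedup (rs.filter (fun y => y != x)) := by
  have h1 : PySem.List.dedup (x :: rs) = rs.foldl PySem.Set.add [x] := by
    simp [PySem.List.dedup_eq_ofList, PySem.Set.ofList_eq_foldl, PySem.Set.add]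
  have h2 : PySem.List.dedup (rs.filter (fun y => y != x)) =
      (rs.filter (fun y => y != x)).foldl PySem.Set.add [] := by
    simp [PySem.List.dedup_eq_ofList, PySem.Set.ofList_eq_foldl]
  have hx : x ∉ rs.filter (fun y => y != x) := by
    simp [List.mem_filter]
  rw [h1, foldl_add_filter_ne x rs [x] (by simp),
    show ([x] : List Int) = x :: [] from rfl, foldl_add_cons_head x _ [] hx, h2]

-- removing all occurrences of x leaves the other frequencies unchanged
theorem count_filter_ne (x y : Int) (rs : List Int) (hyx : y ≠ x) :
    (rs.filter (fun z => z != x)).count y = (x :: rs).count y := by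
  have key : ∀ l : List Int,
      (l.filter (fun z => z != x)).count y = l.count y := by
    intro l
    induction l with
    | nil => rfl
    | cons z zs ih =>
      by_cases h : z = x
      · subst h
        simp [Ne.symm hyx, ih]
      · simp [h, List.count_cons, ih]
  rw [key]
  simp [Ne.symm hyx]

-- frequency of the head equals the length drop of the filtered tail
theorem count_head_eq_length_sub (x : Int) (rs : List Int) :
    (((x :: rs).count x : Int)) =
      ((x :: rs).length : Int) - ((rs.filter (fun y => y != x)).length : Int) := by
  have h := List.length_eq_length_filter_add (l := rs) (fun y => y != x)
  have h2 : (rs.filter (fun y => !(y != x))).length = rs.count x := by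
    simp only [bne, Bool.not_not]
    rw [← List.countP_eq_length_filter]
    rfl
  simp only [List.count_cons_self, List.length_cons]
  push_cast
  omega

-- the extraction loop computes out ++ (distinct items of rest with frequency in [a,b])
theorem functionAltLoop_eq (a b : Int) : ∀ (rest out : List Int),
    functionAltLoop a b out rest =
      out ++ (PySem.List.dedup rest).filter
        (fun x => decide (a ≤ (rest.count x : Int) ∧ (rest.count x : Int) ≤ b))
  | [], out => by simp [functionAltLoop]
  | x :: rs, out => by
    rw [functionAltLoop]
    have ih := functionAltLoop_eq a b (rs.filter (fun y => y != x))
      (if a ≤ ((x :: rs).length : Int) - ((rs.filter (fun y => y != x)).length : Int) ∧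
          ((x :: rs).length : Int) - ((rs.filter (fun y => y != x)).length : Int) ≤ b
       then out ++ [x] else out)
    rw [ih, dedup_cons_filter]
    have hfilter :
        (PySem.List.dedup (rs.filter (fun y => y != x))).filter
          (fun y => decide (a ≤ ((rs.filter (fun z => z != x)).count y : Int) ∧
                            ((rs.filter (fun z => z != x)).count y : Int) ≤ b)) =
        (PySem.List.dedup (rs.filter (fun y => y != x))).filter
          (fun y => decide (a ≤ (((x :: rs).count y : Int)) ∧ (((x :: rs).count y : Int)) ≤ b)) := by
      apply List.filter_congr
      intro y hy
      have hyx : y ≠ x := by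
        have := (PySem.List.mem_dedup _ _).1 hy
        simp [List.mem_filter] at this
        exact this.2
      rw [count_filter_ne x y rs hyx]
    rw [hfilter, List.filter_cons, ← count_head_eq_length_sub x rs]
    by_cases hc : a ≤ (((x :: rs).count x : Int)) ∧ (((x :: rs).count x : Int)) ≤ b
    · rw [if_pos hc, if_pos (by simpa using hc)]
      simp
    · rw [if_neg hc, if_neg (by simpa using hc)]
termination_by rest => rest.length
decreasing_by simpa using Nat.lt_succ_of_le (List.length_filter_le _ _)

-- ===== VERDICT (by name: the statement is the Claim_ definition above) =====
theorem function_spec : Claim_equal_function := by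
  intro L a b _
  unfold Spec_function function_alt
  rw [functionAltLoop_eq, function_eq_dedup_filter]
  simp
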